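-- pv_equiv track=rewrite | github.com/carloterzaghi/Discord_Bot_Kurami | artefatos_genshin/hp_artefato.py | hpPorcentoHeroes_artefato
-- ===== SOURCE A (Python) =====
-- def hpPorcentoHeroes_artefato(nome):
--     if nome == "Vazio":
--         return ""
--     hp = ''
--     pegar = 'nao'
--     for i in nome:
--         if i == "H":
--             pegar = 'sim'
--         elif i == '.' and pegar == 'sim':
--             hp = hp + i
--         elif i.isnumeric() == False:
--             pegar = 'nao'
--         elif pegar == 'sim':
--             hp = hp + i
--     if hp == '':
--         hp = '0'
--     return hp
-- ===== SOURCE B (Python) =====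
-- def hpPorcentoHeroes_artefato(nome):
--     if nome == "Vazio":
--         return ""
--     hp = ''
--     for seg in nome.split('H')[1:]:
--         for ch in seg:
--             if ch.isnumeric() or ch == '.':
--                 hp += ch
--             else:
--                 break
--     return hp if hp else '0'
-- ===== Notes on version B (the rewrite author's own statement) =====
-- stated objective: simpler
-- what changed: Replaces A's per-character flag state machine (pegar 'sim'/'nao') by splitting the name on the letter H and collecting each remaining segment's leading numeric/dot prefix.
import Mathlib
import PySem

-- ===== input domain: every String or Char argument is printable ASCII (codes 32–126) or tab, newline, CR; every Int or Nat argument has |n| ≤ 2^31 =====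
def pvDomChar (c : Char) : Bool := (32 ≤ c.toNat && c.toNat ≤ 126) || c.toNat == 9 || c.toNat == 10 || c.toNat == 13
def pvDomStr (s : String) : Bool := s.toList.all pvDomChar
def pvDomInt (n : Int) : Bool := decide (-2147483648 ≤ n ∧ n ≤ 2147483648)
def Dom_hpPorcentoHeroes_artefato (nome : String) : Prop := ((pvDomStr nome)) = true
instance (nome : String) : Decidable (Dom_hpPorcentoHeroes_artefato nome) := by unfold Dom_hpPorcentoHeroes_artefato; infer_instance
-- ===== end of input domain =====

-- B replaces A's flag-driven character state machine by split-on-'H' followed by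
-- numeric/dot prefix extraction per segment (objective: simpler decomposition, same cost).
-- Python's str.isnumeric is ported as PySem.Chars.isdigit, exact on the ASCII domain Dom_.

-- ===== PORT A =====
-- A's loop: state (hp, pegar) with pegar ∈ {"sim","nao"}, branches in A's order.
def hpA_loop : List Char → List Char → String → List Char
  | [], hp, _ => hp
  | i :: rest, hp, pegar =>
    if i = 'H' then hpA_loop rest hp "sim"
    else if i = '.' ∧ pegar = "sim" then hpA_loop rest (hp ++ [i]) pegar
    else if PySem.Chars.isdigit i = false then hpA_loop rest hp "nao"
    else if pegar = "sim" then hpA_loop rest (hp ++ [i]) pegar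
    else hpA_loop rest hp pegar

def hpPorcentoHeroes_artefato (nome : String) : String :=
  if nome = "Vazio" then "" else
  let hp := hpA_loop nome.toList [] "nao"
  let hp := if hp = [] then ['0'] else hp
  String.ofList hp

-- ===== PORT B =====
-- B's inner loop: append the segment's leading numeric/dot characters to hp, stop at the first other char.
def hpB_seg (hp : List Char) : List Char → List Char
  | [] => hp
  | c :: rest => if PySem.Chars.isdigit c || c = '.' then hpB_seg (hp ++ [c]) rest else hp

def hpPorcentoHeroes_artefato_alt (nome : String) : String :=
  if nome = "Vazio" then "" else
  let hp := ((PySem.Chars.splitOn nome.toList ['H']).drop 1).foldl hpB_seg []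
  if hp = [] then "0" else String.ofList hp

-- ===== PRECONDITION & SPEC =====
def Spec_hpPorcentoHeroes_artefato (nome : String) (out : String) : Prop := out = hpPorcentoHeroes_artefato_alt nome
instance (nome : String) (out : String) : Decidable (Spec_hpPorcentoHeroes_artefato nome out) := by unfold Spec_hpPorcentoHeroes_artefato; infer_instance

-- ===== CLAIM (what is proved, stated in full; the proofs are below) =====
def Claim_equal_hpPorcentoHeroes_artefato : Prop := ∀ (nome : String), Dom_hpPorcentoHeroes_artefato nome → Spec_hpPorcentoHeroes_artefato nome (hpPorcentoHeroes_artefato nome)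

-- ===== LEMMAS AND PROOFS =====

-- Common characterisation: the digits/dots collected, with m = "currently after an H run".
def bwc : Bool → List Char → List Char
  | _, [] => []
  | m, c :: r =>
    if c = 'H' then bwc true r
    else if m && (PySem.Chars.isdigit c || c = '.') then c :: bwc m r
    else bwc false r

theorem hpA_loop_eq (l : List Char) : ∀ (hp : List Char) (m : Bool),
    hpA_loop l hp (if m then "sim" else "nao") = hp ++ bwc m l := by
  induction l with
  | nil => intro hp m; simp [hpA_loop, bwc]
  | cons c r ih =>
    intro hp m
    by_cases hH : c = 'H'
    · subst hH
      have := ih hp true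
      simp [hpA_loop, bwc] at this ⊢
      cases m <;> simpa using this
    · cases m with
      | true =>
        by_cases hd : c = '.'
        · subst hd
          have := ih (hp ++ ['.']) true
          simp [hpA_loop, bwc, PySem.Chars.isdigit] at this ⊢
          simpa using this
        · by_cases hn : PySem.Chars.isdigit c = true
          · have := ih (hp ++ [c]) true
            simp [hpA_loop, bwc, hH, hd, hn] at this ⊢
            simpa using this
          · have := ih hp false
            simp at hn
            simp [hpA_loop, bwc, hH, hd, hn] at this ⊢
            simpa using this
      | false =>
        by_cases hn : PySem.Chars.isdigit c = true
        · have := ih hp false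
          have hd : ¬ (c = '.') := by
            intro h; subst h; simp [PySem.Chars.isdigit] at hn
          simp [hpA_loop, bwc, hH, hd, hn] at this ⊢
          simpa using this
        · have := ih hp false
          simp at hn
          simp [hpA_loop, bwc, hH, hn] at this ⊢
          simpa using this

-- A recursive description of splitOn on the single-character separator 'H'.
def spH : List Char → List (List Char)
  | [] => [[]]
  | c :: r => if c = 'H' then [] :: spH r
              else match spH r with
                   | p :: ps => (c :: p) :: ps
                   | [] => [[c]]

theorem spH_ne_nil (l : List Char) : spH l ≠ [] := by
  cases l with
  | nil => simp [spH]
  | cons c r =>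
    simp only [spH]
    split
    · simp
    · cases h : spH r <;> simp

theorem splitOn_go_eq (fuel : Nat) : ∀ (l : List Char), l.length < fuel →
    ∀ (cur : List Char) (acc : List (List Char)),
    PySem.Chars.splitOn.go ['H'] fuel l cur acc
      = acc.reverse ++ (spH l).modifyHead (cur.reverse ++ ·) := by
  induction fuel with
  | zero => intro l h; omega
  | succ fuel ih =>
    intro l h cur acc
    cases l with
    | nil => simp [PySem.Chars.splitOn.go, spH]
    | cons c r =>
      by_cases hH : c = 'H'
      · subst hH
        have hpre : List.isPrefixOf ['H'] ('H' :: r) = true := by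
          simp [List.isPrefixOf]
        rw [PySem.Chars.splitOn.go]
        simp only [hpre, if_pos]
        have := ih r (by simp at h; omega) [] (cur.reverse :: acc)
        simp only [List.length_cons, List.length_nil, List.drop_succ_cons, List.drop_zero] at this ⊢
        rw [this]
        cases hs : spH r with
        | nil => exact absurd hs (spH_ne_nil r)
        | cons p ps => simp [spH, hs]
      · have hpre : List.isPrefixOf ['H'] (c :: r) = false := by
          simp [List.isPrefixOf]; intro h'; exact absurd h'.symm hH
        rw [PySem.Chars.splitOn.go]
        simp only [hpre, Bool.false_eq_true, if_false]
        have := ih r (by simp at h; omega) (c :: cur) acc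
        rw [this]
        cases hs : spH r with
        | nil => exact absurd hs (spH_ne_nil r)
        | cons p ps => simp [spH, hH, hs]

theorem splitOn_eq_spH (l : List Char) : PySem.Chars.splitOn l ['H'] = spH l := by
  unfold PySem.Chars.splitOn
  rw [splitOn_go_eq (l.length + 1) l (by omega) [] []]
  cases hs : spH l with
  | nil => exact absurd hs (spH_ne_nil l)
  | cons p ps => simp

-- The two fold shapes of B against bwc.
theorem spH_fold (l : List Char) : ∀ (hp : List Char),
    ((spH l).drop 1).foldl hpB_seg hp = hp ++ bwc false l
    ∧ (spH l).foldl hpB_seg hp = hp ++ bwc true l := by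
  induction l with
  | nil => intro hp; simp [spH, bwc, hpB_seg]
  | cons c r ih =>
    intro hp
    by_cases hH : c = 'H'
    · subst hH
      constructor
      · simp only [spH, bwc]
        exact (ih hp).2
      · simp only [spH, bwc]
        exact (ih hp).2
    · cases hs : spH r with
      | nil => exact absurd hs (spH_ne_nil r)
      | cons p ps =>
        have hdrop : ((spH (c :: r)).drop 1) = ps := by simp [spH, hH, hs]
        have hdropr : ((spH r).drop 1) = ps := by simp [hs]
        constructor
        · rw [hdrop]
          have := (ih hp).1
          rw [hdropr] at this
          simpa [bwc, hH] using this
        · have hcons : spH (c :: r) = (c :: p) :: ps := by simp [spH, hH, hs]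
          rw [hcons]
          by_cases hn : (PySem.Chars.isdigit c || c = '.') = true
          · have := (ih (hp ++ [c])).2
            rw [hs] at this
            simp only [List.foldl_cons, hpB_seg, hn] at this ⊢
            simp only [if_true]
            rw [this]
            simp [bwc, hH, hn]
          · have := (ih hp).1
            rw [hdropr] at this
            simp only [List.foldl_cons, hpB_seg, hn] at ⊢
            simp only [Bool.not_eq_true] at hn
            simp only [Bool.false_eq_true, if_false]
            rw [this]
            simp [bwc, hH, hn]

-- ===== VERDICT (by name: the statement is the Claim_ definition above) =====
theorem hpPorcentoHeroes_artefato_spec : Claim_equal_hpPorcentoHeroes_artefato := by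
  intro nome _
  unfold Spec_hpPorcentoHeroes_artefato hpPorcentoHeroes_artefato hpPorcentoHeroes_artefato_alt
  by_cases hv : nome = "Vazio"
  · simp [hv]
  · simp only [hv, if_false]
    rw [splitOn_eq_spH, (spH_fold nome.toList []).1]
    have hA : hpA_loop nome.toList [] "nao" = bwc false nome.toList := by
      simpa using hpA_loop_eq nome.toList [] false
    rw [hA]
    cases h : bwc false nome.toList <;> simp
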